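-- pv_equiv track=rewrite | github.com/upi2110/revolve | stats/bias_tracker.py | get_bias_stats
-- ===== SOURCE A (Python) =====
-- from collections import Counter
--
-- def get_bias_stats(numbers):
--     zones = {
--         "Voisins": [22,18,29,7,28,12,35,3,26,0,32,15,19,4,21,2,25],
--         "Tiers": [27,13,36,11,30,8,23,10,5,24,16,33],
--         "Orphelins": [1,20,14,31,9,6,34,17]
--     }
--     freq = Counter(numbers)
--     zone_hits = {zone: sum(freq[n] for n in nums) for zone, nums in zones.items()}
--     return zone_hits
-- ===== SOURCE B (Python) =====
-- def get_bias_stats(numbers):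
--     zones = {
--         "Voisins": [22,18,29,7,28,12,35,3,26,0,32,15,19,4,21,2,25],
--         "Tiers": [27,13,36,11,30,8,23,10,5,24,16,33],
--         "Orphelins": [1,20,14,31,9,6,34,17]
--     }
--     index = {}
--     for zone, nums in zones.items():
--         for n in nums:
--             index[n] = zone
--     zone_hits = {zone: 0 for zone in zones}
--     for n in numbers:
--         z = index.get(n)
--         if z is not None:
--             zone_hits[z] += 1
--     return zone_hits
-- ===== Notes on version B (the rewrite author's own statement) =====
-- stated objective: faster
-- what changed: Replaced the Counter plus per-zone summation with a reverse number-to-zone index built once and a single pass over numbers incrementing the hit counter of each number's zone.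
import Mathlib
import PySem

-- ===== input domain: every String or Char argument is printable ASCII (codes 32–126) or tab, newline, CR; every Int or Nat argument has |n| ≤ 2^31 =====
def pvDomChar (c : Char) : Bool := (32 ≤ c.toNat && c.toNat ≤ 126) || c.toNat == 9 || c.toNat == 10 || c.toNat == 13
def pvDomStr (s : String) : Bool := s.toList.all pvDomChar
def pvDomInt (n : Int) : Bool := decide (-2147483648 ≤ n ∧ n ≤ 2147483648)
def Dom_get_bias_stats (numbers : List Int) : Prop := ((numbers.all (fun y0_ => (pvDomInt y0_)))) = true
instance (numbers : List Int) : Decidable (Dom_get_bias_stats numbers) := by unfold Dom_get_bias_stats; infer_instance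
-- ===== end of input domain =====

set_option maxRecDepth 10000

-- B builds a reverse number→zone index once and counts hits in a single pass over
-- `numbers` (one dict lookup per number), instead of A's Counter plus a per-zone sum.

-- ===== PORT A =====
def pvZones : List (String × List Int) :=
  [("Voisins", [22,18,29,7,28,12,35,3,26,0,32,15,19,4,21,2,25]),
   ("Tiers", [27,13,36,11,30,8,23,10,5,24,16,33]),
   ("Orphelins", [1,20,14,31,9,6,34,17])]

-- freq = Counter(numbers); zone_hits = {zone: sum(freq[n] for n in nums) for zone, nums in zones.items()}
def get_bias_stats (numbers : List Int) : List (String × Int) :=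
  let freq := PySem.Dict.counter numbers
  pvZones.map (fun zn => (zn.1, (zn.2.map (fun n => freq.getD n 0)).sum))

-- ===== PORT B =====
-- index = {}; for zone, nums in zones.items(): for n in nums: index[n] = zone
def pvIndex : PySem.Dict Int String :=
  pvZones.foldl (fun d zn => zn.2.foldl (fun d n => d.insert n zn.1) d) PySem.Dict.empty

-- loop body: z = index.get(n); if z is not None: zone_hits[z] += 1
def pvStepB (d : PySem.Dict String Int) (n : Int) : PySem.Dict String Int :=
  match pvIndex.get? n with
  | some z => d.modify z 0 (· + 1)
  | none => d

def get_bias_stats_alt (numbers : List Int) : List (String × Int) :=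
  let init : PySem.Dict String Int :=
    pvZones.foldl (fun d zn => d.insert zn.1 0) PySem.Dict.empty
  (numbers.foldl pvStepB init).items

-- ===== PRECONDITION & SPEC =====
def Spec_get_bias_stats (numbers : List Int) (out : List (String × Int)) : Prop := out = get_bias_stats_alt numbers
instance (numbers : List Int) (out : List (String × Int)) : Decidable (Spec_get_bias_stats numbers out) := by unfold Spec_get_bias_stats; infer_instance

-- ===== CLAIM (what is proved, stated in full; the proofs are below) =====
def Claim_equal_get_bias_stats : Prop := ∀ (numbers : List Int), Dom_get_bias_stats numbers → Spec_get_bias_stats numbers (get_bias_stats numbers)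

-- ===== LEMMAS AND PROOFS =====

def pvVoisins : List Int := [22,18,29,7,28,12,35,3,26,0,32,15,19,4,21,2,25]
def pvTiers : List Int := [27,13,36,11,30,8,23,10,5,24,16,33]
def pvOrphelins : List Int := [1,20,14,31,9,6,34,17]

-- the reverse index, characterised pointwise
lemma pvIndex_get? (x : Int) :
    pvIndex.get? x =
      if x ∈ pvVoisins then some "Voisins"
      else if x ∈ pvTiers then some "Tiers"
      else if x ∈ pvOrphelins then some "Orphelins"
      else none := by
  by_cases hx : x ∈ pvVoisins ++ pvTiers ++ pvOrphelins
  · simp only [pvVoisins, pvTiers, pvOrphelins, List.cons_append,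
      List.nil_append, List.mem_cons, List.not_mem_nil, or_false] at hx
    rcases hx with h|h|h|h|h|h|h|h|h|h|h|h|h|h|h|h|h|h|h|h|h|h|h|h|h|h|h|h|h|h|h|h|h|h|h|h|h <;>
      subst h <;> decide
  · have hkeys : pvIndex.keys = pvVoisins ++ pvTiers ++ pvOrphelins := by decide
    have h1 : x ∉ pvVoisins := fun h => hx (by simp [h])
    have h2 : x ∉ pvTiers := fun h => hx (by simp [h])
    have h3 : x ∉ pvOrphelins := fun h => hx (by simp [h])
    rw [(PySem.Dict.get?_eq_none_iff_not_mem_keys _ _).mpr (by rw [hkeys]; exact hx),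
        if_neg h1, if_neg h2, if_neg h3]

lemma countP_or_disjoint {α : Type} (p q : α → Bool) (l : List α)
    (h : ∀ x ∈ l, ¬(p x = true ∧ q x = true)) :
    l.countP (fun x => p x || q x) = l.countP p + l.countP q := by
  induction l with
  | nil => simp
  | cons a t ih =>
    have ha := h a (by simp)
    have ht : ∀ x ∈ t, ¬(p x = true ∧ q x = true) := fun x hx => h x (by simp [hx])
    rw [List.countP_cons, List.countP_cons, List.countP_cons, ih ht]
    by_cases hp : p a = true
    · have hq : q a = false := by
        cases hq2 : q a
        · rfl
        · exact absurd ⟨hp, hq2⟩ ha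
      simp [hp, hq] <;> omega
    · cases hq : q a <;> simp [hp, hq] <;> omega

lemma sum_count_eq_countP (zs numbers : List Int) (h : zs.Nodup) :
    (zs.map (fun n => numbers.count n)).sum = numbers.countP (fun x => decide (x ∈ zs)) := by
  induction zs with
  | nil => simp
  | cons z t ih =>
    rcases List.nodup_cons.mp h with ⟨hz, ht⟩
    have hsplit : numbers.countP (fun x => decide (x ∈ z :: t)) =
        numbers.countP (fun x => x == z) + numbers.countP (fun x => decide (x ∈ t)) := by
      rw [← countP_or_disjoint (fun x => x == z) (fun x => decide (x ∈ t)) numbers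
            (fun x _ h => hz (by rw [← beq_iff_eq.mp h.1]; simpa using h.2))]
      apply List.countP_congr
      intro x _
      simp [List.mem_cons]
    rw [List.map_cons, List.sum_cons, ih ht, hsplit, List.count]

lemma foldl_stepB_getD (l : List Int) (d : PySem.Dict String Int) (z : String) :
    (l.foldl pvStepB d).getD z 0 =
      d.getD z 0 + (l.countP (fun n => pvIndex.get? n == some z) : Int) := by
  induction l generalizing d with
  | nil => simp
  | cons n t ih =>
    rw [List.foldl_cons, ih, List.countP_cons]
    cases hidx : pvIndex.get? n with
    | none =>
      have : pvStepB d n = d := by simp only [pvStepB, hidx]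
      rw [this]
      simp
    | some w =>
      have hstep : pvStepB d n = d.modify w 0 (· + 1) := by simp only [pvStepB, hidx]
      rw [hstep, PySem.Dict.getD_modify]
      by_cases hw : z = w
      · subst hw; simp; ring
      · have hzw : w ≠ z := fun h => hw h.symm
        simp [hw, hzw]

lemma foldl_stepB_keys (l : List Int) (d : PySem.Dict String Int)
    (hd : ∀ w, w ∈ (["Voisins", "Tiers", "Orphelins"] : List String) → d.contains w = true) :
    (l.foldl pvStepB d).keys = d.keys := by
  induction l generalizing d with
  | nil => rfl
  | cons n t ih =>
    rw [List.foldl_cons]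
    cases hidx : pvIndex.get? n with
    | none =>
      have : pvStepB d n = d := by simp only [pvStepB, hidx]
      rw [this]; exact ih d hd
    | some w =>
      have hw : w ∈ (["Voisins", "Tiers", "Orphelins"] : List String) := by
        rw [pvIndex_get?] at hidx
        split_ifs at hidx <;> simp_all
      have hstep : pvStepB d n = d.modify w 0 (· + 1) := by simp only [pvStepB, hidx]
      rw [hstep, ih]
      · rw [PySem.Dict.keys_modify, PySem.Dict.keys_insert_of_contains _ _ (hd w hw)]
      · intro v hv
        rw [PySem.Dict.contains_modify]
        simp [hd v hv]

lemma countP_idx_eq (numbers zs : List Int) (z : String)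
    (hch : ∀ x : Int, pvIndex.get? x = some z ↔ x ∈ zs) :
    numbers.countP (fun n => pvIndex.get? n == some z) = numbers.countP (fun x => decide (x ∈ zs)) := by
  apply List.countP_congr
  intro x _
  simp [hch x]

lemma zoneA_sum (numbers zs : List Int) (h : zs.Nodup) :
    (zs.map (fun n => (PySem.Dict.counter numbers).getD n 0)).sum
      = (numbers.countP (fun x => decide (x ∈ zs)) : Int) := by
  have hm : zs.map (fun n => (PySem.Dict.counter numbers).getD n 0)
      = zs.map (fun n => ((numbers.count n : Nat) : Int)) := by
    simp [PySem.Dict.getD_counter]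
  rw [hm, ← sum_count_eq_countP zs numbers h, Nat.cast_list_sum, List.map_map]
  rfl

lemma hch_V : ∀ x : Int, pvIndex.get? x = some "Voisins" ↔ x ∈ pvVoisins := by
  intro x
  rw [pvIndex_get?]
  split_ifs with h1 h2 h3
  · simp [h1]
  · simp; exact h1
  · simp; exact h1
  · simp; exact h1

lemma hch_T : ∀ x : Int, pvIndex.get? x = some "Tiers" ↔ x ∈ pvTiers := by
  have hVT : ∀ x ∈ pvVoisins, x ∉ pvTiers := by decide
  intro x
  rw [pvIndex_get?]
  split_ifs with h1 h2 h3
  · simp; exact fun hT => hVT x h1 hT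
  · simp [h2]
  · simp; exact h2
  · simp; exact h2

lemma hch_O : ∀ x : Int, pvIndex.get? x = some "Orphelins" ↔ x ∈ pvOrphelins := by
  have hVO : ∀ x ∈ pvVoisins, x ∉ pvOrphelins := by decide
  have hTO : ∀ x ∈ pvTiers, x ∉ pvOrphelins := by decide
  intro x
  rw [pvIndex_get?]
  split_ifs with h1 h2 h3
  · simp; exact fun hO => hVO x h1 hO
  · simp; exact fun hO => hTO x h2 hO
  · simp [h3]
  · simp; exact h3

-- ===== VERDICT (by name: the statement is the Claim_ definition above) =====
theorem get_bias_stats_spec : Claim_equal_get_bias_stats := by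
  intro numbers _
  unfold Spec_get_bias_stats get_bias_stats get_bias_stats_alt
  simp only []
  set init : PySem.Dict String Int :=
    pvZones.foldl (fun d zn => d.insert zn.1 0) PySem.Dict.empty with hinit
  have hinitc : ∀ w ∈ (["Voisins", "Tiers", "Orphelins"] : List String),
      init.contains w = true := by decide
  have hkeys : (numbers.foldl pvStepB init).keys = ["Voisins", "Tiers", "Orphelins"] :=
    (foldl_stepB_keys numbers init hinitc).trans (by decide)
  have hnd : (numbers.foldl pvStepB init).keys.Nodup := by rw [hkeys]; decide
  rw [PySem.Dict.items_eq_map_keys _ hnd 0, hkeys]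
  simp only [List.map_cons, List.map_nil, pvZones]
  rw [foldl_stepB_getD, foldl_stepB_getD, foldl_stepB_getD,
      countP_idx_eq numbers pvVoisins "Voisins" hch_V,
      countP_idx_eq numbers pvTiers "Tiers" hch_T,
      countP_idx_eq numbers pvOrphelins "Orphelins" hch_O,
      show init.getD "Voisins" 0 = 0 from by decide,
      show init.getD "Tiers" 0 = 0 from by decide,
      show init.getD "Orphelins" 0 = 0 from by decide]
  have hV := zoneA_sum numbers pvVoisins (by decide)
  have hT := zoneA_sum numbers pvTiers (by decide)
  have hO := zoneA_sum numbers pvOrphelins (by decide)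
  simp only [pvVoisins, pvTiers, pvOrphelins, List.map_cons, List.map_nil] at hV hT hO ⊢
  rw [hV, hT, hO]
  simp
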